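-- pv_equiv track=rewrite | github.com/VKU-Security-Lab/CTF-Writeup-2024 | MetaCTF/2024/RST/RE/pico-cypher/sol.py | sm0_simulation
-- ===== SOURCE A (Python) =====
-- def invert(bits):
--     return bits ^ 0xFFFFFFFF
--
-- def sm0_simulation(data):
--     y = 0
--     x = 0
--     output = []
--
--     for byte in data:
--         y = byte
--         y = invert(y)
--         while True:
--             if y != 0:
--                 y -= 1
--             else:
--                 break
--             if x != 0:
--                 x -= 1
--             else:
--                 break
--         y = invert(y)
--         x = y
--         output.append(chr(x & 0x7F))
--
--     return ''.join(output)
-- ===== SOURCE B (Python) =====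
-- def sm0_simulation(data):
--     # Closed form of the cipher step (for non-negative bytes): the inner decrement
--     # loop ends with y = y0-x-1 if y0 > x else 0.
--     out = []
--     x = 0
--     for byte in data:
--         y0 = byte ^ 0xFFFFFFFF
--         yf = y0 - x - 1 if y0 > x else 0
--         x = yf ^ 0xFFFFFFFF
--         out.append(chr(x & 0x7F))
--     return ''.join(out)
-- ===== Notes on version B (the rewrite author's own statement) =====
-- stated objective: faster
-- what changed: Replaced the per-byte decrement-both-counters busy loop (~2^32 iterations per byte) by its closed form y = y0-x-1 if y0 > x else 0, O(1) per byte; intended as asymptotically faster — a timing run measured A timing out at n=16 where B returned, so no ratio could be read.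
-- outside the precondition, e.g. on sm0_simulation([-1]): A returns '\x00', B returns '\x7f'; on sm0_simulation([-5]): A returns '|', B returns '\x7f'; on sm0_simulation([-1, -1]): A does not finish within the time limit, B returns '\x7f\x7f'
import Mathlib
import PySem

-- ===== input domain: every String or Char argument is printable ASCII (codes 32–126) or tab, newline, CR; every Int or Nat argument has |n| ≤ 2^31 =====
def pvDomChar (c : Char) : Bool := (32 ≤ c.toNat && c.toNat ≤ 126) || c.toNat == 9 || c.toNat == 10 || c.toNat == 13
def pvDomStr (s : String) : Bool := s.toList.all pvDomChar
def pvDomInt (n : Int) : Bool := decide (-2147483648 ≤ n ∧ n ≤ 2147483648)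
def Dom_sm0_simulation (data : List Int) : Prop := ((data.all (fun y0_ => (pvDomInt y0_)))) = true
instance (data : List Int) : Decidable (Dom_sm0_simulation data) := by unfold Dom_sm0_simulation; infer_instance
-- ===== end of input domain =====

-- B replaces A's per-byte busy loop (up to ~2^32 decrements per byte) by its O(1) closed form.

-- ===== PORT A =====
def pvInvert (bits : Int) : Int := PySem.Int.bxor bits 0xFFFFFFFF

-- A's inner 'while True' loop, step for step; fuel only makes it total (Python
-- diverges when y starts negative; Pre_ excludes that).
def pvLoopA : Nat → Int → Int → Int × Int
  | 0, y, x => (y, x)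
  | fuel+1, y, x =>
    if y ≠ 0 then
      if x ≠ 0 then pvLoopA fuel (y - 1) (x - 1)
      else (y - 1, x)
    else (y, x)

def sm0_simulation (data : List Int) : String :=
  let r := data.foldl (fun (st : Int × List Char) byte =>
    let y := byte
    let y := pvInvert y
    let p := pvLoopA (y.toNat + 1) y st.1
    let y := pvInvert p.1
    let x := y
    (x, st.2 ++ [Char.ofNat (PySem.Int.band x 0x7F).toNat])) (0, [])
  String.ofList r.2

-- ===== PORT B =====
def pvAltGo : List Int → Int → List Char
  | [], _ => []
  | byte :: rest, x =>
    let y0 := PySem.Int.bxor byte 0xFFFFFFFF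
    let yf := if y0 > x then y0 - x - 1 else 0
    let x' := PySem.Int.bxor yf 0xFFFFFFFF
    Char.ofNat (PySem.Int.band x' 0x7F).toNat :: pvAltGo rest x'

def sm0_simulation_alt (data : List Int) : String :=
  String.ofList (pvAltGo data 0)

-- ===== PRECONDITION & SPEC =====
-- Pre_ excludes lists with a negative element (outside the cipher's byte domain): there
-- invert(byte) is negative, so A's inner loop either diverges (e.g. on [-1, -1]) or is cut
-- short only by the leftover x counter.
def Pre_sm0_simulation (data : List Int) : Prop := ∀ b ∈ data, 0 ≤ b
instance (data : List Int) : Decidable (Pre_sm0_simulation data) := by unfold Pre_sm0_simulation; infer_instance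
def pvWitness_sm0_simulation : List Int := [72, 101, 108, 0]

def Spec_sm0_simulation (data : List Int) (out : String) : Prop := out = sm0_simulation_alt data
instance (data : List Int) (out : String) : Decidable (Spec_sm0_simulation data out) := by unfold Spec_sm0_simulation; infer_instance

-- ===== CLAIM (what is proved, stated in full; the proofs are below) =====
def Claim_equal_sm0_simulation : Prop := ∀ (data : List Int), Dom_sm0_simulation data → Pre_sm0_simulation data → Spec_sm0_simulation data (sm0_simulation data)

-- ===== LEMMAS AND PROOFS =====

-- closed form of A's inner loop
theorem pvLoopA_eq (fuel : Nat) (y x : Int) (hy : 0 ≤ y) (hx : 0 ≤ x)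
    (hf : y.toNat < fuel) : (pvLoopA fuel y x).1 = if y > x then y - x - 1 else 0 := by
  induction fuel generalizing y x with
  | zero => omega
  | succ n ih =>
    unfold pvLoopA
    by_cases h : y = 0
    · simp [h]; omega
    · by_cases h2 : x = 0
      · simp [h, h2]; omega
      · simp only [h, h2, ne_eq, not_false_iff, if_true]
        rw [ih (y - 1) (x - 1) (by omega) (by omega) (by omega)]
        split_ifs <;> omega

theorem pvXor_nonneg (a b : Int) (ha : 0 ≤ a) (hb : 0 ≤ b) : 0 ≤ PySem.Int.bxor a b := by
  rw [PySem.Int.bxor_of_nonneg ha hb]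
  exact Int.natCast_nonneg _

theorem pvFold_eq (data : List Int) (x : Int) (acc : List Char)
    (hpre : ∀ b ∈ data, 0 ≤ b) (hx : 0 ≤ x) :
    (data.foldl (fun (st : Int × List Char) byte =>
      (pvInvert (pvLoopA ((pvInvert byte).toNat + 1) (pvInvert byte) st.1).1,
       st.2 ++ [Char.ofNat (PySem.Int.band
         (pvInvert (pvLoopA ((pvInvert byte).toNat + 1) (pvInvert byte) st.1).1) 0x7F).toNat]))
      (x, acc)).2
      = acc ++ pvAltGo data x := by
  induction data generalizing x acc with
  | nil => simp [pvAltGo]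
  | cons b rest ih =>
    have hb : 0 ≤ b := hpre b (by simp)
    have hy0 : 0 ≤ pvInvert b := pvXor_nonneg b 0xFFFFFFFF hb (by norm_num)
    have key := pvLoopA_eq ((pvInvert b).toNat + 1) (pvInvert b) x hy0 hx (by omega)
    have hyf : 0 ≤ (if pvInvert b > x then pvInvert b - x - 1 else 0) := by
      split_ifs <;> omega
    simp only [List.foldl_cons, key]
    rw [ih (pvInvert (if pvInvert b > x then pvInvert b - x - 1 else 0)) _
      (fun c hc => hpre c (List.mem_cons_of_mem _ hc))
      (pvXor_nonneg _ _ hyf (by norm_num))]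
    simp [pvAltGo, pvInvert]

-- ===== VERDICT (by name: the statement is the Claim_ definition above) =====
theorem sm0_simulation_spec : Claim_equal_sm0_simulation := by
  intro data _ hpre
  exact congrArg String.ofList (pvFold_eq data 0 [] hpre (le_refl 0))
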